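-- pv_equiv track=rewrite | github.com/almar456/School | 28 Sept/2.4 Functie met If.py | new_password
-- ===== SOURCE A (Python) =====
-- def new_password(oldpassword: str,newpassword: str):
--     if (oldpassword == newpassword) or (len(newpassword)<6):
--         return False
--     else:
--         for x in ['0','1','2','3','4','5','6','7','8','9']:
--             if x in newpassword:
--                 return True
--         return False
-- ===== SOURCE B (Python) =====
-- def new_password(oldpassword: str, newpassword: str):
--     if oldpassword == newpassword or len(newpassword) < 6:
--         return False
--     return any(c in '0123456789' for c in newpassword)
-- ===== Notes on version B (the rewrite author's own statement) =====
-- stated objective: idiomatic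
-- what changed: Replaces the loop over the ten digit strings with substring scans of the password by a single any() pass over the password's characters testing membership in '0123456789', transposing the traversal.
import Mathlib
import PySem

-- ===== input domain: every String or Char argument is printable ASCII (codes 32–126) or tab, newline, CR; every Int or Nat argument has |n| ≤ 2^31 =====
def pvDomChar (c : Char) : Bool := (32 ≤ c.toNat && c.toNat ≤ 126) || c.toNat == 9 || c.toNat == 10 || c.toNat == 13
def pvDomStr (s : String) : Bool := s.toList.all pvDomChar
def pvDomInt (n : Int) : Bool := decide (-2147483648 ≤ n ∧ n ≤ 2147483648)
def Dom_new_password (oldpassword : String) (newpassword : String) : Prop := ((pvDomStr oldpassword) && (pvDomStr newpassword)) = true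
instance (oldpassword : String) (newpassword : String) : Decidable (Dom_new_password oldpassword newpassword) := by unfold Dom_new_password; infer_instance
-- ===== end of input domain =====

-- B replaces the digit-list-with-substring-scan loop by one any() pass over the password's characters (idiomatic).
-- ===== PORT A =====
-- the for-loop over the digit strings with early return True
def pvDigitLoop (newpassword : String) : List String → Bool
  | [] => false
  | x :: rest => if PySem.Str.isIn x newpassword then true else pvDigitLoop newpassword rest

def new_password (oldpassword : String) (newpassword : String) : Bool :=
  if oldpassword == newpassword || PySem.Str.len newpassword < 6 then false
  else pvDigitLoop newpassword ["0","1","2","3","4","5","6","7","8","9"]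

-- ===== PORT B =====
def new_password_alt (oldpassword : String) (newpassword : String) : Bool :=
  if oldpassword == newpassword || PySem.Str.len newpassword < 6 then false
  else newpassword.toList.any (fun c => ("0123456789".toList).contains c)

-- ===== PRECONDITION & SPEC =====
def Spec_new_password (oldpassword : String) (newpassword : String) (out : Bool) : Prop := out = new_password_alt oldpassword newpassword
instance (oldpassword : String) (newpassword : String) (out : Bool) : Decidable (Spec_new_password oldpassword newpassword out) := by unfold Spec_new_password; infer_instance

-- ===== CLAIM (what is proved, stated in full; the proofs are below) =====
def Claim_equal_new_password : Prop := ∀ (oldpassword : String) (newpassword : String), Dom_new_password oldpassword newpassword → Spec_new_password oldpassword newpassword (new_password oldpassword newpassword)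

-- ===== LEMMAS AND PROOFS =====

-- ===== VERDICT (by name: the statement is the Claim_ definition above) =====
-- 'x in s' for a one-character string x is membership of that character in s
lemma chars_isIn_singleton (d : Char) (l : List Char) :
    PySem.Chars.isIn [d] l = l.contains d := by
  rcases h : l.contains d with _ | _
  · rw [PySem.Chars.isIn_eq_false_iff, List.singleton_infix_iff]
    simpa using h
  · rw [PySem.Chars.isIn_iff_infix, List.singleton_infix_iff]
    simpa using h

-- the transposed traversals agree
lemma loop_eq_any (s : String) :
    pvDigitLoop s ["0","1","2","3","4","5","6","7","8","9"]
      = s.toList.any (fun c => ("0123456789".toList).contains c) := by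
  have hd : ("0123456789" : String).toList = ['0','1','2','3','4','5','6','7','8','9'] := by decide
  simp only [pvDigitLoop, PySem.Str.isIn, hd]
  have h0 : ("0" : String).toList = ['0'] := by decide
  have h1 : ("1" : String).toList = ['1'] := by decide
  have h2 : ("2" : String).toList = ['2'] := by decide
  have h3 : ("3" : String).toList = ['3'] := by decide
  have h4 : ("4" : String).toList = ['4'] := by decide
  have h5 : ("5" : String).toList = ['5'] := by decide
  have h6 : ("6" : String).toList = ['6'] := by decide
  have h7 : ("7" : String).toList = ['7'] := by decide
  have h8 : ("8" : String).toList = ['8'] := by decide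
  have h9 : ("9" : String).toList = ['9'] := by decide
  simp only [h0, h1, h2, h3, h4, h5, h6, h7, h8, h9, chars_isIn_singleton]
  rcases hl : s.toList.any (fun c => ['0','1','2','3','4','5','6','7','8','9'].contains c)
      with _ | _
  · simp only [List.any_eq_false, List.contains_eq_mem, decide_eq_true_eq] at hl
    simp
    refine ⟨?_, ?_, ?_, ?_, ?_, ?_, ?_, ?_, ?_, ?_⟩ <;>
      exact fun h => (hl _ h) (by decide)
  · simp only [List.any_eq_true, List.contains_eq_mem, decide_eq_true_eq] at hl
    obtain ⟨c, hc, hcd⟩ := hl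
    have : s.toList.contains c = true := by simpa [List.contains_eq_mem] using hc
    fin_cases hcd <;> simp_all

theorem new_password_spec : Claim_equal_new_password := by
  intro o n _
  unfold Spec_new_password new_password new_password_alt
  split
  · rfl
  · exact loop_eq_any n
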